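-- pv_equiv track=rewrite | github.com/rtlcopymemory/Huffman-compression | huffDecode.py | consume
-- ===== SOURCE A (Python) =====
-- def consume(sequence: str, dictionary: dict) -> tuple:
--     acc: str = ""
--     for i, bit in enumerate(sequence):
--         acc += bit
--         for translation, compression in dictionary.items():
--             if acc == compression:
--                 return translation, sequence[i + 1:]
--     return "", ""
-- ===== SOURCE B (Python) =====
-- def consume(sequence: str, dictionary: dict) -> tuple:
--     # Build a trie over the compression codes once (first translation wins),
--     # then decode by a single descent over the bits.
--     root = {}
--     for translation, compression in dictionary.items():
--         node = root
--         for ch in compression: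
--             node = node.setdefault(ch, {})
--         node.setdefault(None, translation)
--     node = root
--     for i, ch in enumerate(sequence):
--         if ch not in node:
--             return "", ""
--         node = node[ch]
--         if None in node:
--             return node[None], sequence[i + 1:]
--     return "", ""
-- ===== Notes on version B (the rewrite author's own statement) =====
-- stated objective: alternative
-- what changed: Replaces A's accumulate-a-prefix-and-rescan-the-whole-dictionary inner loop with a trie built once from the codes (first translation wins) and a single one-bit-at-a-time descent over the sequence.
import Mathlib
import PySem

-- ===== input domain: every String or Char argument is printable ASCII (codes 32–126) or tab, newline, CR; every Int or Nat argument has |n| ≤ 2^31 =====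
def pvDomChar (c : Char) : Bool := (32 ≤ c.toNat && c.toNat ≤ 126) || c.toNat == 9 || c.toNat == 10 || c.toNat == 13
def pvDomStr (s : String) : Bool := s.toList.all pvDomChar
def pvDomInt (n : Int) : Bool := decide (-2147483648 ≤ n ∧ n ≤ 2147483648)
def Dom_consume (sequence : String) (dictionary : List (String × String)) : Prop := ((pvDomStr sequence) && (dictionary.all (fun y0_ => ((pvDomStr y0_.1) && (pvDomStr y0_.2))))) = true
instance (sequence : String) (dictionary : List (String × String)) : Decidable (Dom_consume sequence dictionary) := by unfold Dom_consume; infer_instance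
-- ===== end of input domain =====

-- ===== PORT A =====
-- B changes: builds a trie of the codes once and decodes by a single descent; A rescans the whole dictionary per accumulated prefix.

-- inner loop of A: scan the dictionary for the first entry whose compression equals acc
def consumeScan (acc : List Char) : List (String × String) → Option String
  | [] => none
  | (translation, compression) :: rest =>
    if acc = compression.toList then some translation else consumeScan acc rest

-- outer loop of A over (index, bit) pairs, accumulating acc
def consumeGo (seqAll : List Char) (dict : List (String × String)) :
    List Char → Nat → List Char → String × String
  | [], _, _ => ("", "")
  | bit :: rest, i, acc =>
    let acc' := acc ++ [bit]
    match consumeScan acc' dict with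
    | some translation => (translation, String.ofList (seqAll.drop (i + 1)))
    | none => consumeGo seqAll dict rest (i + 1) acc'

def consume (sequence : String) (dictionary : List (String × String)) : String × String :=
  consumeGo sequence.toList dictionary sequence.toList 0 []

-- ===== PORT B =====
mutual
inductive BTrie where
  | node : Option String → BKids → BTrie
inductive BKids where
  | nil : BKids
  | cons : Char → BTrie → BKids → BKids
end

def kidsFind : BKids → Char → Option BTrie
  | .nil, _ => none
  | .cons c t rest, ch => if c = ch then some t else kidsFind rest ch

mutual
-- insert a code (path) with its translation; existing leaf marker is kept (setdefault)
def trieInsert : BTrie → List Char → String → BTrie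
  | .node m kids, [], v =>
    .node (match m with | some _ => m | none => some v) kids
  | .node m kids, c :: cs, v => .node m (kidsInsert kids c cs v)

def kidsInsert : BKids → Char → List Char → String → BKids
  | .nil, c, cs, v => .cons c (trieInsert (.node none .nil) cs v) .nil
  | .cons c' t rest, c, cs, v =>
    if c' = c then .cons c' (trieInsert t cs v) rest
    else .cons c' t (kidsInsert rest c cs v)
end

def trieStep (t : BTrie) (ch : Char) : Option BTrie :=
  match t with | .node _ kids => kidsFind kids ch

def trieMarker (t : BTrie) : Option String :=
  match t with | .node m _ => m

def buildTrie (dictionary : List (String × String)) : BTrie :=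
  dictionary.foldl (fun t e => trieInsert t e.2.toList e.1) (.node none .nil)

-- B's walk: descend one bit at a time, emit at the first leaf reached
def trieWalk (seqAll : List Char) : BTrie → List Char → Nat → String × String
  | _, [], _ => ("", "")
  | node, ch :: rest, i =>
    match trieStep node ch with
    | none => ("", "")
    | some node' =>
      match trieMarker node' with
      | some translation => (translation, String.ofList (seqAll.drop (i + 1)))
      | none => trieWalk seqAll node' rest (i + 1)

def consume_alt (sequence : String) (dictionary : List (String × String)) : String × String :=
  trieWalk sequence.toList (buildTrie dictionary) sequence.toList 0

-- ===== PRECONDITION & SPEC =====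
def Spec_consume (sequence : String) (dictionary : List (String × String)) (out : String × String) : Prop := out = consume_alt sequence dictionary
instance (sequence : String) (dictionary : List (String × String)) (out : String × String) : Decidable (Spec_consume sequence dictionary out) := by unfold Spec_consume; infer_instance

-- ===== CLAIM (what is proved, stated in full; the proofs are below) =====
def Claim_equal_consume : Prop := ∀ (sequence : String) (dictionary : List (String × String)), Dom_consume sequence dictionary → Spec_consume sequence dictionary (consume sequence dictionary)

-- ===== LEMMAS AND PROOFS =====

-- lookup of a full path in a trie
def trieLookup : BTrie → List Char → Option String
  | .node m _, [] => m
  | .node _ kids, c :: cs =>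
    match kidsFind kids c with
    | none => none
    | some t => trieLookup t cs

def kidsGetOr (kids : BKids) (c : Char) : BTrie :=
  match kidsFind kids c with
  | none => .node none .nil
  | some t => t

theorem lookup_empty (p : List Char) : trieLookup (.node none .nil) p = none := by
  cases p <;> simp [trieLookup, kidsFind]

theorem kidsFind_insert (kids : BKids) (c : Char) (cs : List Char) (v : String) (c' : Char) :
    kidsFind (kidsInsert kids c cs v) c' =
      if c' = c then some (trieInsert (kidsGetOr kids c) cs v) else kidsFind kids c' := by
  cases kids with
  | nil =>
    simp only [kidsInsert, kidsFind, kidsGetOr]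
    split_ifs <;> simp_all [eq_comm]
  | cons c0 t rest =>
    by_cases h : c0 = c
    · subst h
      simp only [kidsInsert, kidsFind, kidsGetOr]
      split_ifs <;> simp_all [kidsFind, eq_comm]
    · simp only [kidsInsert, if_neg h, kidsFind, kidsFind_insert rest c cs v c', kidsGetOr]
      split_ifs <;> simp_all [eq_comm]

theorem lookup_insert (c : List Char) (t : BTrie) (v : String) (p : List Char) :
    trieLookup (trieInsert t c v) p =
      if p = c then (trieLookup t c).or (some v) else trieLookup t p := by
  induction c generalizing t p with
  | nil =>
    obtain ⟨m, kids⟩ := t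
    cases p with
    | nil => cases m <;> simp [trieInsert, trieLookup, Option.or]
    | cons c' cs => cases m <;> simp [trieInsert, trieLookup]
  | cons ch cs ih =>
    obtain ⟨m, kids⟩ := t
    cases p with
    | nil => simp [trieInsert, trieLookup]
    | cons ch' ps =>
      simp only [trieInsert, trieLookup, kidsFind_insert]
      by_cases h : ch' = ch
      · subst h
        rw [if_pos rfl]
        by_cases hp : ps = cs
        · subst hp
          rw [if_pos rfl]
          cases hf : kidsFind kids ch' <;>
            simp [kidsGetOr, hf, ih, lookup_empty, Option.or]
        · rw [if_neg (fun hh : ch' :: ps = ch' :: cs => hp (by injection hh))]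
          cases hf : kidsFind kids ch' <;>
            simp [kidsGetOr, hf, ih, hp, lookup_empty]
      · rw [if_neg h, if_neg (fun hh : ch' :: ps = ch :: cs => h (by injection hh))]

theorem lookup_build_aux (d : List (String × String)) (t : BTrie) (p : List Char) :
    trieLookup (d.foldl (fun t e => trieInsert t e.2.toList e.1) t) p =
      (trieLookup t p).or (consumeScan p d) := by
  induction d generalizing t with
  | nil => simp [consumeScan]
  | cons e rest ih =>
    obtain ⟨tr, comp⟩ := e
    simp only [List.foldl_cons, ih, lookup_insert, consumeScan]
    by_cases h : p = comp.toList
    · subst h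
      simp
    · simp [h]

theorem lookup_build (d : List (String × String)) (p : List Char) :
    trieLookup (buildTrie d) p = consumeScan p d := by
  simp [buildTrie, lookup_build_aux, lookup_empty]

-- A returns ("","") when every extension of acc fails to match
theorem go_dead (seqAll : List Char) (d : List (String × String))
    (l : List Char) (i : Nat) (acc : List Char)
    (h : ∀ q : List Char, consumeScan (acc ++ q) d = none) :
    consumeGo seqAll d l i acc = ("", "") := by
  induction l generalizing i acc with
  | nil => simp [consumeGo]
  | cons bit rest ih =>
    simp only [consumeGo]
    rw [show acc ++ [bit] = acc ++ [bit] from rfl, h [bit]]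
    exact ih (i + 1) (acc ++ [bit]) (fun q => by
      have := h ([bit] ++ q); simpa using this)

theorem go_eq_walk (seqAll : List Char) (d : List (String × String))
    (l : List Char) (i : Nat) (acc : List Char) (node : BTrie)
    (h : ∀ q : List Char, trieLookup (buildTrie d) (acc ++ q) = trieLookup node q) :
    consumeGo seqAll d l i acc = trieWalk seqAll node l i := by
  induction l generalizing i acc node with
  | nil => simp [consumeGo, trieWalk]
  | cons bit rest ih =>
    simp only [consumeGo, trieWalk]
    have hscan : consumeScan (acc ++ [bit]) d = trieLookup node [bit] := by
      rw [← lookup_build, h [bit]]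
    obtain ⟨m, kids⟩ := node
    cases hf : kidsFind kids bit with
    | none =>
      have hnone : consumeScan (acc ++ [bit]) d = none := by
        rw [hscan]; simp [trieLookup, hf]
      rw [hnone]
      simp only [trieStep, hf]
      exact go_dead seqAll d rest (i + 1) (acc ++ [bit]) (fun q => by
        rw [← lookup_build, show acc ++ [bit] ++ q = acc ++ ([bit] ++ q) by simp,
          h ([bit] ++ q)]
        simp [trieLookup, hf])
    | some node' =>
      have hsc : consumeScan (acc ++ [bit]) d = trieLookup node' [] := by
        rw [hscan]; simp [trieLookup, hf]
      simp only [trieStep, hf]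
      obtain ⟨m', kids'⟩ := node'
      cases m' with
      | some tr =>
        rw [hsc]; simp [trieLookup, trieMarker]
      | none =>
        rw [hsc]
        simp only [trieLookup, trieMarker]
        exact ih (i + 1) (acc ++ [bit]) (.node none kids') (fun q => by
          rw [show acc ++ [bit] ++ q = acc ++ ([bit] ++ q) by simp, h ([bit] ++ q)]
          simp [trieLookup, hf])

-- ===== VERDICT (by name: the statement is the Claim_ definition above) =====
theorem consume_spec : Claim_equal_consume := by
  intro sequence dictionary _
  unfold Spec_consume consume consume_alt
  exact go_eq_walk _ _ _ 0 [] (buildTrie dictionary) (fun q => by simp)
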